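-- pv_equiv track=rewrite | github.com/banderasz/practice | day17/day17.py | find_parent_sub
-- ===== SOURCE A (Python) =====
-- def find_parent_sub(list_of_string, level):
--     if level > 0:
--         path = ""
--         query = "\t"*level
--         for i in range(len(list_of_string)):
--             if query in list_of_string[i]:
--                 path += list_of_string[i].strip("\t") +"/"+find_parent_sub(list_of_string[i+1:], level-1)
--                 break
--         return path
--     else:
--         return list_of_string[-1]
-- ===== SOURCE B (Python) =====
-- def find_parent_sub(list_of_string, level):
--     path = ""
--     cur = list_of_string
--     while level > 0:
--         query = "\t" * level
--         i = next((j for j, s in enumerate(cur) if query in s), None)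
--         if i is None:
--             return path
--         path += cur[i].strip("\t") + "/"
--         cur = cur[i + 1:]
--         level -= 1
--     return path + cur[-1]
-- ===== Notes on version B (the rewrite author's own statement) =====
-- stated objective: alternative
-- what changed: A's linear recursion (recursive call on the slice after the first level-query match, result built by string concatenation around the recursive call) is replaced by an explicit iterative loop over the state (path accumulator, current slice, level), appending each segment to path and returning it directly on a miss.
import Mathlib
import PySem

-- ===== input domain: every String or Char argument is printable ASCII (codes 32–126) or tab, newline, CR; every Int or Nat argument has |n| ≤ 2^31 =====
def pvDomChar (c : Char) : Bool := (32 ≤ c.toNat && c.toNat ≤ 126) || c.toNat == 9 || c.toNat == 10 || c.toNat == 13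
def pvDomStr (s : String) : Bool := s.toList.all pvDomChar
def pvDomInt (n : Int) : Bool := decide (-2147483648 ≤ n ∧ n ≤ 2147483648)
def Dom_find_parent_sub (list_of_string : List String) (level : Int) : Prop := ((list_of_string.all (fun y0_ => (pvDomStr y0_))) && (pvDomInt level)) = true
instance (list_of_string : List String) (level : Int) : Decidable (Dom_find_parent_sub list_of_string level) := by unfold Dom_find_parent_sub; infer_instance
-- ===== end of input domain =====

-- B replaces A's linear recursion by an explicit accumulator loop over (path, cur, level); objective: alternative decomposition, same cost.


-- ===== PORT A =====
-- query = "\t"*level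
def pvQueryA (level : Int) : String := String.ofList (List.replicate level.toNat '\t')

-- the for-loop with break: first element containing q, together with the slice after it
def pvScanA (q : String) : List String → Option (String × List String)
  | [] => none
  | s :: rest => if PySem.Str.isIn q s then some (s, rest) else pvScanA q rest

def find_parent_sub (list_of_string : List String) (level : Int) : String :=
  if 0 < level then
    match pvScanA (pvQueryA level) list_of_string with
    | none => ""
    | some (s, rest) =>
        PySem.Str.stripChars s "\t" ++ "/" ++ find_parent_sub rest (level - 1)
  else
    -- list_of_string[-1]; Pre_ guarantees the list is nonempty whenever this line runs in Python
    (PySem.List.pyGet? list_of_string (-1)).getD ""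
termination_by level.toNat
decreasing_by omega

-- ===== PORT B =====
def pvTabsB (n : Int) : String := String.ofList (List.replicate n.toNat '\t')

-- index of the first hit: next((j for j, s in enumerate(cur) if query in s), None)
def pvHitB (q : String) (cur : List String) : Option Nat :=
  cur.findIdx? (fun s => PySem.Str.isIn q s)

-- the while-loop over the state (path, cur, level)
def pvLoopB (path : String) (cur : List String) (level : Int) : String :=
  if 0 < level then
    match pvHitB (pvTabsB level) cur with
    | none => path
    | some i =>
        pvLoopB (path ++ PySem.Str.stripChars ((PySem.List.pyGet? cur (i : Int)).getD "") "\t" ++ "/")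
          (cur.drop (i + 1)) (level - 1)
  else
    path ++ (PySem.List.pyGet? cur (-1)).getD ""
termination_by level.toNat
decreasing_by omega

def find_parent_sub_alt (list_of_string : List String) (level : Int) : String :=
  pvLoopB "" list_of_string level

-- ===== PRECONDITION & SPEC =====
-- Pre_ excludes EXACTLY the inputs on which Python A raises IndexError at list_of_string[-1]
-- (B raises there identically, so neither program returns a value there).  That crash set is
-- path-dependent -- the cascade of first level-query matches consumes the whole list and the
-- level-0 step indexes an empty slice -- so its exact description necessarily follows that chain
-- of match positions; pvCrashChain tracks ONLY those positions (no path/strip/output of either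
-- program; 'the k-tab query occurs in s' is decided as 'k <= the longest tab run of s', exact for k >= 1).
-- On every input where A returns a value, Pre_ holds.
def pvMaxTabRun (s : String) : Nat :=
  (s.toList.foldl (fun p c => if c = '\t' then (p.1 + 1, max p.2 (p.1 + 1)) else (0, p.2)) (0, 0)).2

def pvCrashChain : List String -> Nat -> Bool
  | xs, 0 => xs.isEmpty
  | xs, (k+1) =>
    match xs.findIdx? (fun s => k + 1 <= pvMaxTabRun s) with
    | none => false
    | some i => pvCrashChain (xs.drop (i + 1)) k

def Pre_find_parent_sub (list_of_string : List String) (level : Int) : Prop :=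
  pvCrashChain list_of_string level.toNat = false
instance (list_of_string : List String) (level : Int) : Decidable (Pre_find_parent_sub list_of_string level) := by unfold Pre_find_parent_sub; infer_instance

def pvWitness_find_parent_sub : List String × Int := (["\t\ta", "\tb", "c"], 2)

def Spec_find_parent_sub (list_of_string : List String) (level : Int) (out : String) : Prop := out = find_parent_sub_alt list_of_string level
instance (list_of_string : List String) (level : Int) (out : String) : Decidable (Spec_find_parent_sub list_of_string level out) := by unfold Spec_find_parent_sub; infer_instance

-- ===== CLAIM (what is proved, stated in full; the proofs are below) =====
def Claim_equal_find_parent_sub : Prop := ∀ (list_of_string : List String) (level : Int), Dom_find_parent_sub list_of_string level → Pre_find_parent_sub list_of_string level → Spec_find_parent_sub list_of_string level (find_parent_sub list_of_string level)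

-- ===== LEMMAS AND PROOFS =====

-- B's index-based scan finds exactly the (element, tail-slice) pair A's scan returns
lemma pvHit_eq_scan (q : String) (xs : List String) :
    (pvHitB q xs).map
      (fun (i : Nat) => (((PySem.List.pyGet? xs ((i : Nat) : Int)).getD ""), xs.drop (i + 1)))
      = pvScanA q xs := by
  induction xs with
  | nil => rfl
  | cons s rest ih =>
    unfold pvHitB pvScanA
    rw [List.findIdx?_cons]
    by_cases h : PySem.Str.isIn q s
    · have h' : PySem.Chars.isIn q.toList s.toList = true := h
      simp [h', PySem.List.pyGet?, PySem.List.pyIdx?]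
    · simp only [h, Bool.false_eq_true, ite_false]
      rw [← ih]
      unfold pvHitB
      cases hf : List.findIdx? (fun s => PySem.Str.isIn q s) rest with
      | none => simp
      | some i =>
        simp only [Option.map_some]
        congr 1
        have hc : ((i + 1 : Nat) : Int) = ((i : Nat) : Int) + 1 := by push_cast; ring
        rw [hc, PySem.List.pyGet?_cons_succ]
        simp [List.drop_succ_cons]

-- the loop with accumulator `path` computes `path ++` the recursion's value (holds on every input)
lemma pvLoop_eq (n : Nat) : ∀ (level : Int), level.toNat ≤ n →
    ∀ (xs : List String) (path : String),
      pvLoopB path xs level = path ++ find_parent_sub xs level := by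
  induction n with
  | zero =>
    intro level h xs path
    have hle : ¬ 0 < level := by omega
    rw [pvLoopB, find_parent_sub]
    simp [hle]
  | succ n ih =>
    intro level h xs path
    by_cases hpos : 0 < level
    · rw [pvLoopB, find_parent_sub]
      simp only [hpos, if_pos]
      rw [show pvTabsB level = pvQueryA level from rfl]
      cases hh : pvHitB (pvQueryA level) xs with
      | none =>
        have hs := pvHit_eq_scan (pvQueryA level) xs
        rw [hh] at hs
        simp only [Option.map_none] at hs
        rw [← hs]
        simp
      | some i =>
        have hs := pvHit_eq_scan (pvQueryA level) xs
        rw [hh] at hs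
        simp only [Option.map_some] at hs
        rw [← hs]
        dsimp only
        rw [ih (level - 1) (by omega)]
        simp [String.append_assoc]
    · rw [pvLoopB, find_parent_sub]
      simp [hpos]

-- ===== VERDICT (by name: the statement is the Claim_ definition above) =====
theorem find_parent_sub_spec : Claim_equal_find_parent_sub := by
  intro xs level _ _
  unfold Spec_find_parent_sub find_parent_sub_alt
  rw [pvLoop_eq level.toNat level (le_refl _) xs ""]
  exact String.empty_append.symm
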